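-- pv_equiv track=rewrite | github.com/DeepDiverGuy/print_all_pdfs | print_all_pdfs.py | get_front_pages
-- ===== SOURCE A (Python) =====
-- import math
--
-- def num_physical_sheets(total_pages):
--     """Total physical sheets needed for a PDF (each sheet holds 2 pages)."""
--     return math.ceil(total_pages / 2)
--
-- def get_front_pages(total_pages):
--     """
--     Pages printed on the FRONT side (odd-numbered physical sheets).
--     Sheet 1 = pages 1,2 | Sheet 3 = pages 5,6 | Sheet 5 = pages 9,10 | ...
--     """
--     num_sheets = num_physical_sheets(total_pages)
--     pages = []
--     for sheet_idx in range(0, num_sheets, 2):   # 0-based: 0,2,4,...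
--         p1 = sheet_idx * 2 + 1
--         p2 = p1 + 1
--         pages.append(p1)
--         if p2 <= total_pages:
--             pages.append(p2)
--     return pages
-- ===== SOURCE B (Python) =====
-- def get_front_pages(total_pages):
--     """
--     Pages printed on the FRONT side (odd-numbered physical sheets),
--     computed per page: page p lies on 1-based sheet ((p-1)//2)+1, which is
--     odd exactly when ((p-1)//2) % 2 == 0.
--     """
--     num_sheets = (total_pages + 1) // 2
--     return [p for p in range(1, 2 * num_sheets + 1)
--             if ((p - 1) // 2) % 2 == 0 and p <= total_pages]
-- ===== Notes on version B (the rewrite author's own statement) =====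
-- stated objective: alternative
-- what changed: B replaces A's sheet loop (step-2 range emitting one or two pages per odd sheet via conditional appends) with a single comprehension over every candidate page 1..2*num_sheets kept by a modular which-sheet predicate ((p-1)//2) % 2 == 0 and p <= total_pages.
import Mathlib
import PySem

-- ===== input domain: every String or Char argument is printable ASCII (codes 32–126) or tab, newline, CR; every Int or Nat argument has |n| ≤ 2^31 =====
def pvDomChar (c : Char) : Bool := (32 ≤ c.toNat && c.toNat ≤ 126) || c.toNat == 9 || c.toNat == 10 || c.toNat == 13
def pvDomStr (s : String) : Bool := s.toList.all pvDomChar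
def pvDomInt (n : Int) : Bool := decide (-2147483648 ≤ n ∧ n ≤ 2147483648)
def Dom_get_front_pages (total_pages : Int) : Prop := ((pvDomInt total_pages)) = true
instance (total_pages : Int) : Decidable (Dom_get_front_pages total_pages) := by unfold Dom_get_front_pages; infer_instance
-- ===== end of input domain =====

-- B replaces A's sheet loop with a single per-page comprehension filtered by a
-- modular which-sheet predicate; alternative decomposition, same cost.


-- ===== PORT A =====
-- math.ceil(total_pages / 2): exact as ceiling division -((-n) // 2) for the
-- integer inputs of Dom (|n| ≤ 2^31, well below float precision loss).
def num_physical_sheets (total_pages : Int) : Int :=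
  -(PySem.Int.floordiv (-total_pages) 2)

def get_front_pages (total_pages : Int) : List Int :=
  let num_sheets := num_physical_sheets total_pages
  (PySem.List.pyRange 0 num_sheets 2).foldl (fun pages sheet_idx =>
    let p1 := sheet_idx * 2 + 1
    let p2 := p1 + 1
    let pages := pages ++ [p1]
    if p2 ≤ total_pages then pages ++ [p2] else pages) []

-- ===== PORT B =====
def get_front_pages_alt (total_pages : Int) : List Int :=
  let num_sheets := PySem.Int.floordiv (total_pages + 1) 2
  (PySem.List.pyRange 1 (2 * num_sheets + 1) 1).filter (fun p =>
    decide (PySem.Int.mod (PySem.Int.floordiv (p - 1) 2) 2 = 0) && decide (p ≤ total_pages))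

-- ===== PRECONDITION & SPEC =====
def Spec_get_front_pages (total_pages : Int) (out : List Int) : Prop := out = get_front_pages_alt total_pages
instance (total_pages : Int) (out : List Int) : Decidable (Spec_get_front_pages total_pages out) := by unfold Spec_get_front_pages; infer_instance

-- ===== CLAIM (what is proved, stated in full; the proofs are below) =====
def Claim_equal_get_front_pages : Prop := ∀ (total_pages : Int), Dom_get_front_pages total_pages → Spec_get_front_pages total_pages (get_front_pages total_pages)

-- ===== LEMMAS AND PROOFS =====

-- pages emitted by A for one odd sheet (0-based index i)
def pvSheetPages (tp i : Int) : List Int :=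
  if i * 2 + 1 + 1 ≤ tp then [i * 2 + 1, i * 2 + 1 + 1] else [i * 2 + 1]

-- B's per-page predicate
def pvFront (tp p : Int) : Bool :=
  decide (PySem.Int.mod (PySem.Int.floordiv (p - 1) 2) 2 = 0) && decide (p ≤ tp)

lemma pv_foldA (tp : Int) (l : List Int) (acc : List Int) :
    l.foldl (fun pages sheet_idx =>
      let p1 := sheet_idx * 2 + 1
      let p2 := p1 + 1
      let pages := pages ++ [p1]
      if p2 ≤ tp then pages ++ [p2] else pages) acc
    = acc ++ l.flatMap (pvSheetPages tp) := by
  induction l generalizing acc with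
  | nil => simp
  | cons x xs ih =>
      simp only [List.foldl_cons, List.flatMap_cons, ih, pvSheetPages]
      split <;> simp

lemma pv_ceil_eq (tp : Int) :
    num_physical_sheets tp = PySem.Int.floordiv (tp + 1) 2 := by
  unfold num_physical_sheets
  rw [PySem.Int.floordiv_eq_ediv_of_pos (by norm_num : (0:Int) < 2),
      PySem.Int.floordiv_eq_ediv_of_pos (by norm_num : (0:Int) < 2)]
  omega

lemma pv_A_eq (tp : Int) :
    get_front_pages tp
      = (PySem.List.pyRange 0 (PySem.Int.floordiv (tp + 1) 2) 2).flatMap (pvSheetPages tp) := by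
  unfold get_front_pages
  rw [pv_ceil_eq, pv_foldA]
  simp

lemma pv_B_eq (tp : Int) :
    get_front_pages_alt tp
      = (PySem.List.pyRange 1 (2 * PySem.Int.floordiv (tp + 1) 2 + 1) 1).filter (pvFront tp) := rfl

lemma pv_sheet_shift (tp i : Int) :
    pvSheetPages tp (i + 2) = (pvSheetPages (tp - 4) i).map (· + 4) := by
  unfold pvSheetPages
  by_cases h : i * 2 + 1 + 1 ≤ tp - 4
  · rw [if_pos h, if_pos (by omega)]; simp; constructor <;> ring
  · rw [if_neg h, if_neg (by omega)]; simp; ring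

lemma pv_front_shift (tp p : Int) :
    pvFront tp (p + 4) = pvFront (tp - 4) p := by
  unfold pvFront
  rw [PySem.Int.floordiv_eq_ediv_of_pos (by norm_num : (0:Int) < 2),
      PySem.Int.floordiv_eq_ediv_of_pos (by norm_num : (0:Int) < 2),
      PySem.Int.mod_eq_emod_of_pos (by norm_num : (0:Int) < 2),
      PySem.Int.mod_eq_emod_of_pos (by norm_num : (0:Int) < 2)]
  congr 1 <;> rw [decide_eq_decide] <;> omega

lemma pv_rangeA_peel (n : Nat) :
    PySem.List.pyRange 0 ((n : Int) + 2) 2 = 0 :: (PySem.List.pyRange 0 (n : Int) 2).map (· + 2) := by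
  rw [PySem.List.pyRange_of_pos _ _ (by norm_num : (0:Int) < 2),
      PySem.List.pyRange_of_pos _ _ (by norm_num : (0:Int) < 2)]
  rw [if_pos (by omega : (0:Int) < (n:Int) + 2)]
  by_cases hn : (0:Int) < (n:Int)
  · rw [if_pos hn]
    have hs : (((n:Int) + 2 - 0 + 2 - 1) / 2).toNat = (((n:Int) - 0 + 2 - 1) / 2).toNat + 1 := by omega
    rw [hs, List.range_succ_eq_map, List.map_cons, List.map_map, List.map_map]
    refine List.cons_eq_cons.mpr ⟨by norm_num, ?_⟩
    apply List.map_congr_left; intro k _; simp [Function.comp]; ring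
  · rw [if_neg hn]
    have : (((n:Int) + 2 - 0 + 2 - 1) / 2).toNat = 1 := by omega
    rw [this]
    simp

lemma pv_rangeB_peel (n : Nat) :
    PySem.List.pyRange 1 (2 * ((n : Int) + 2) + 1) 1
      = [1, 2, 3, 4] ++ (PySem.List.pyRange 1 (2 * (n : Int) + 1) 1).map (· + 4) := by
  rw [PySem.List.pyRange_one, PySem.List.pyRange_one]
  have h1 : (2 * ((n:Int) + 2) + 1 - 1).toNat = 4 + 2 * n := by omega
  have h2 : (2 * (n:Int) + 1 - 1).toNat = 2 * n := by omega
  rw [h1, h2, List.range_add, List.map_append, List.map_map, List.map_map]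
  refine congrArg₂ _ (by decide) ?_
  apply List.map_congr_left; intro k _; simp [Function.comp]; ring

lemma pv_main (n : Nat) (tp : Int) (h : 2 * (n : Int) - 1 ≤ tp) :
    (PySem.List.pyRange 0 (n : Int) 2).flatMap (pvSheetPages tp)
      = (PySem.List.pyRange 1 (2 * (n : Int) + 1) 1).filter (pvFront tp) := by
  induction n using Nat.twoStepInduction generalizing tp with
  | zero =>
      norm_num
      intro x hx
      rw [show PySem.List.pyRange 0 0 2 = ([] : List Int) from rfl] at hx
      simp at hx
  | one =>
      norm_num at h ⊢
      rw [show PySem.List.pyRange 0 1 2 = [0] from rfl, show PySem.List.pyRange 1 3 1 = [1, 2] from rfl]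
      simp only [List.flatMap_cons, List.flatMap_nil, List.append_nil]
      unfold pvSheetPages pvFront
      norm_num
      by_cases h2tp : (2:Int) ≤ tp <;>
        simp [List.filter, h, h2tp]
  | more n ih _ =>
      have hcast : ((n + 2 : Nat) : Int) = (n : Int) + 2 := by push_cast; ring
      rw [hcast, pv_rangeA_peel, pv_rangeB_peel]
      rw [List.flatMap_cons, List.flatMap_map, List.filter_append]
      have hmap : (fun i => pvSheetPages tp (i + 2)) = fun i => (pvSheetPages (tp - 4) i).map (· + 4) := by
        funext i; exact pv_sheet_shift tp i
      have htp : (2:Int) ≤ tp := by omega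
      have h1tp : (1:Int) ≤ tp := by omega
      have hfilter4 : List.filter (pvFront tp) [1, 2, 3, 4] = [1, 2] := by
        simp [List.filter, pvFront, htp, h1tp]
      rw [hmap, hfilter4]
      have : List.flatMap (fun i => (pvSheetPages (tp - 4) i).map (· + 4)) (PySem.List.pyRange 0 (n:Int) 2)
           = (List.flatMap (pvSheetPages (tp - 4)) (PySem.List.pyRange 0 (n:Int) 2)).map (· + 4) := by
        rw [List.map_flatMap]
      rw [this, ih (tp - 4) (by omega)]
      have hfm : List.filter (pvFront tp) ((PySem.List.pyRange 1 (2 * (n:Int) + 1) 1).map (· + 4))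
           = (List.filter (pvFront (tp - 4)) (PySem.List.pyRange 1 (2 * (n:Int) + 1) 1)).map (· + 4) := by
        rw [List.filter_map]
        refine congrArg _ ?_
        apply List.filter_congr
        intro p _
        simpa [Function.comp] using pv_front_shift tp p
      rw [hfm]
      have hg0 : pvSheetPages tp 0 = [1, 2] := by
        unfold pvSheetPages
        rw [if_pos (by omega : (0:Int) * 2 + 1 + 1 ≤ tp)]
        norm_num
      rw [hg0]

-- ===== VERDICT (by name: the statement is the Claim_ definition above) =====
theorem get_front_pages_spec : Claim_equal_get_front_pages := by
  intro tp _
  unfold Spec_get_front_pages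
  rw [pv_A_eq, pv_B_eq]
  set m := PySem.Int.floordiv (tp + 1) 2 with hm
  have hm' : m = (tp + 1) / 2 := by
    rw [hm, PySem.Int.floordiv_eq_ediv_of_pos (by norm_num : (0:Int) < 2)]
  by_cases h : 0 < m
  · have hn : m = ((m.toNat : Nat) : Int) := by omega
    rw [hn]
    exact pv_main m.toNat tp (by omega)
  · have h1 : PySem.List.pyRange 0 m 2 = [] := by
      rw [PySem.List.pyRange_of_pos _ _ (by norm_num : (0:Int) < 2), if_neg (by omega)]
      simp
    have h2 : PySem.List.pyRange 1 (2 * m + 1) 1 = [] := by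
      rw [PySem.List.pyRange_one]
      have : (2 * m + 1 - 1).toNat = 0 := by omega
      rw [this]; simp
    rw [h1, h2]; simp
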